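-- pv_equiv track=rewrite | github.com/rubberramen/Algorithm-Practice | algorithm_day12/study03_method.py | day12
-- ===== SOURCE A (Python) =====
-- def day12(n):
--     answer_list = []
--     while n // 2 > 0:
--         a = n % 2  # a == 1
--         answer_list.append(a)  #
--         n //= 2
--     answer_list.append(n)
--
--     answer_num = 0
--     temp = 0
--
--     for i in answer_list:
--         answer_num += (10 ** temp) * i
--         temp += 1
--
--     return answer_num
-- ===== SOURCE B (Python) =====
-- def day12(n):
--     # Recursive: the binary-as-decimal of n is that of n//2 shifted one
--     # decimal place left, plus the low bit; base case returns n itself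
--     # (covers 0, 1 and negatives, whose floor division never exceeds 0).
--     if n // 2 > 0:
--         return day12(n // 2) * 10 + n % 2
--     return n
-- ===== Notes on version B (the rewrite author's own statement) =====
-- stated objective: simpler
-- what changed: B replaces A's two iterative passes (build a low-to-high bit list, then fold it with an explicit power-of-ten counter) by a three-line recursion that builds the number high-to-low as day12(n//2)*10 + n%2, with no list and no power-of-ten state.
import Mathlib
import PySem

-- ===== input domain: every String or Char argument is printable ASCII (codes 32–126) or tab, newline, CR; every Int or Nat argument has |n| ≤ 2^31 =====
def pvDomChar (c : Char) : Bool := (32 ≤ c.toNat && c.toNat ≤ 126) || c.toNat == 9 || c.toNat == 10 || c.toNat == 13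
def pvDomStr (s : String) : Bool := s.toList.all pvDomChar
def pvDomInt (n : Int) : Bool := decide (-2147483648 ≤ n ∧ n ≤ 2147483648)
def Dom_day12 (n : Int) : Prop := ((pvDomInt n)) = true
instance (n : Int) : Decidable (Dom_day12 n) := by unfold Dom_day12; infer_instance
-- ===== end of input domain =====

-- B replaces A's list-building loop plus power-of-ten fold by a three-line recursion
-- day12(n//2)*10 + n%2; equivalence proved for all Int.

-- ===== PORT A =====
-- the while loop of A: builds answer_list (bits low-to-high, then the final n)
def day12_bits (n : Int) : List Int :=
  if PySem.Int.floordiv n 2 > 0 then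
    PySem.Int.mod n 2 :: day12_bits (PySem.Int.floordiv n 2)
  else [n]
termination_by n.toNat
decreasing_by
  rw [PySem.Int.floordiv_eq_ediv_of_pos (by omega : (0:Int) < 2)] at *
  omega

-- the for loop of A; temp only counts 0,1,2,… so it is kept as a Nat (exact: Python's temp stays a nonnegative int)
def day12 (n : Int) : Int :=
  ((day12_bits n).foldl (fun (p : Int × Nat) i => (p.1 + (10:Int) ^ p.2 * i, p.2 + 1)) (0, 0)).1

-- ===== PORT B =====
def day12_alt (n : Int) : Int :=
  if PySem.Int.floordiv n 2 > 0 then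
    day12_alt (PySem.Int.floordiv n 2) * 10 + PySem.Int.mod n 2
  else n
termination_by n.toNat
decreasing_by
  rw [PySem.Int.floordiv_eq_ediv_of_pos (by omega : (0:Int) < 2)] at *
  omega

-- ===== PRECONDITION & SPEC =====
def Spec_day12 (n : Int) (out : Int) : Prop := out = day12_alt n
instance (n : Int) (out : Int) : Decidable (Spec_day12 n out) := by unfold Spec_day12; infer_instance

-- ===== CLAIM (what is proved, stated in full; the proofs are below) =====
def Claim_equal_day12 : Prop := ∀ (n : Int), Dom_day12 n → Spec_day12 n (day12 n)

-- ===== LEMMAS AND PROOFS =====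
theorem day12_fold_eq_alt (n : Int) :
    ∀ (a : Int) (t : Nat),
      ((day12_bits n).foldl (fun (p : Int × Nat) i => (p.1 + (10:Int) ^ p.2 * i, p.2 + 1)) (a, t)).1
        = a + (10:Int) ^ t * day12_alt n := by
  fun_induction day12_bits n with
  | case1 n h ih =>
    intro a t
    rw [day12_alt, if_pos h]
    have := ih (a + (10:Int) ^ t * PySem.Int.mod n 2) (t + 1)
    simp only [List.foldl] at *
    rw [this]
    ring
  | case2 n h =>
    intro a t
    rw [day12_alt, if_neg h]
    simp [List.foldl]

-- ===== VERDICT (by name: the statement is the Claim_ definition above) =====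
theorem day12_spec : Claim_equal_day12 := by
  intro n _
  show day12 n = day12_alt n
  simpa using day12_fold_eq_alt n 0 0
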